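-- pv_equiv track=rewrite | github.com/robert-haas/alogos | alogos/systems/cfggpst/representation.py | _find_subtree_end
-- ===== SOURCE A (Python) =====
-- def _find_subtree_end(s, cnt):
--     """Find index of the last symbol in a subtree.
--
--     This method is used by crossover and mutation operators.
--
--     """
--     c = cnt[s]
--     while c:
--         s += 1
--         n = cnt[s]
--         if n == 0:
--             c -= 1
--         elif n > 1:
--             c += n - 1
--     return s
-- ===== SOURCE B (Python) =====
-- def _find_subtree_end(s, cnt):
--     """Find index of the last symbol in a subtree (explicit DFS stack version)."""
--     stack = [cnt[s]]
--     while stack: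
--         if stack[-1] == 0:
--             stack.pop()
--         else:
--             stack[-1] -= 1
--             s += 1
--             stack.append(cnt[s])
--     return s
-- ===== Notes on version B (the rewrite author's own statement) =====
-- stated objective: alternative
-- what changed: B replaces A's single open-slot counter with an explicit DFS stack of per-node pending-child counts (push a node's arity on entering it, decrement the top when descending into the next child, pop when a node's children are exhausted), i.e. a genuine depth-first descent instead of A's aggregate-counter forward scan.
-- outside the precondition, e.g. on _find_subtree_end(0, [1, -5, 0]): A returns 2, B raises IndexError; on _find_subtree_end(-1, [-2, 0, 1, 184, 1]): A returns 1, B raises IndexError; on _find_subtree_end(-1, [0, 1]): A returns 0, B returns 0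
import Mathlib
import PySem

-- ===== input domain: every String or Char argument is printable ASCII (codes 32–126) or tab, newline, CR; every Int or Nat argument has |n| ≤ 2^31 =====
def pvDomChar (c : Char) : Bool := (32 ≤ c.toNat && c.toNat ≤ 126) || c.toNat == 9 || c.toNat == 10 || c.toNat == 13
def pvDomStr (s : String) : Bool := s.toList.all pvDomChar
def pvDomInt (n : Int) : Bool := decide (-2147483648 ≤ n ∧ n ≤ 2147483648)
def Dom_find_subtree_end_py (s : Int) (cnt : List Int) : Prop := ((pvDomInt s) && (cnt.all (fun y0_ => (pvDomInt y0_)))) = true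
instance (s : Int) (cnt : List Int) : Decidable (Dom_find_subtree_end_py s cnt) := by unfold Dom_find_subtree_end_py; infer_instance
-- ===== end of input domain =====

-- B replaces A's single open-slot counter scan by a DFS with an explicit stack of
-- per-node pending-child counts (objective: alternative; same O(n) cost).

-- ===== PORT A =====
-- A's while loop as fuel recursion: inside Pre_ the loop makes at most cnt.length
-- iterations (s strictly increases and stays < cnt.length), so fuel cnt.length + 1
-- never runs out there; out-of-range reads (excluded by Pre_: Python raises) get 0.
def pvLoopA (cnt : List Int) : Nat → Int → Int → Int
  | 0, s, _ => s
  | f + 1, s, c =>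
    if c = 0 then s
    else
      let s' := s + 1
      let n := (PySem.List.pyGet? cnt s').getD 0
      pvLoopA cnt f s' (if n = 0 then c - 1 else if n > 1 then c + n - 1 else c)

def find_subtree_end_py (s : Int) (cnt : List Int) : Int :=
  pvLoopA cnt (cnt.length + 1) s ((PySem.List.pyGet? cnt s).getD 0)

-- ===== PORT B =====
-- B's while loop; the Python list used as a stack (append/[-1]/pop at the end) is
-- modelled top-first.  Inside Pre_ at most 2*cnt.length + 1 steps happen.
def pvLoopB (cnt : List Int) : Nat → Int → List Int → Int
  | 0, s, _ => s
  | f + 1, s, st =>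
    match st with
    | [] => s
    | top :: rest =>
      if top = 0 then pvLoopB cnt f s rest
      else pvLoopB cnt f (s + 1)
        (((PySem.List.pyGet? cnt (s + 1)).getD 0) :: (top - 1) :: rest)

def find_subtree_end_py_alt (s : Int) (cnt : List Int) : Int :=
  pvLoopB cnt (2 * cnt.length + 2) s [(PySem.List.pyGet? cnt s).getD 0]

-- ===== PRECONDITION & SPEC =====
-- Pre_ is the natural domain of the function: the start index is valid and either
-- points at a leaf (arity 0, the subtree is that single symbol), or is a
-- nonnegative start into a well-formed arity encoding (nonnegative arities, the
-- subtree complete inside the list, i.e. the tail sum small enough that the walk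
-- ends before the end of the list).  Outside it A either raises IndexError, or
-- returns an accidental value of its scan (it silently treats a negative arity
-- like arity 1, and walks on from a negative start index through Python's
-- negative-index wraparound); B's stack walk raises on some of those negative-arity
-- inputs and is not claimed on the rest.
def Pre_find_subtree_end_py (s : Int) (cnt : List Int) : Prop :=
  PySem.Raise.InRange cnt.length s ∧
    ((PySem.List.pyGet? cnt s).getD 0 = 0 ∨
      (0 ≤ s ∧ (∀ x ∈ cnt, 0 ≤ x) ∧
        (cnt.drop s.toNat).sum ≤ (cnt.length : Int) - s - 1))

instance (s : Int) (cnt : List Int) : Decidable (Pre_find_subtree_end_py s cnt) := by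
  unfold Pre_find_subtree_end_py; infer_instance

def pvWitness_find_subtree_end_py : Int × List Int := (0, [2, 0, 0])

def Spec_find_subtree_end_py (s : Int) (cnt : List Int) (out : Int) : Prop := out = find_subtree_end_py_alt s cnt
instance (s : Int) (cnt : List Int) (out : Int) : Decidable (Spec_find_subtree_end_py s cnt out) := by unfold Spec_find_subtree_end_py; infer_instance

-- ===== CLAIM (what is proved, stated in full; the proofs are below) =====
def Claim_equal_find_subtree_end_py : Prop := ∀ (s : Int) (cnt : List Int), Dom_find_subtree_end_py s cnt → Pre_find_subtree_end_py s cnt → Spec_find_subtree_end_py s cnt (find_subtree_end_py s cnt)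

-- ===== LEMMAS AND PROOFS =====

-- remaining "slot deficit" of the tail after position j
def pvTQ (cnt : List Int) (j : Nat) : Int :=
  (cnt.drop (j + 1)).sum - ((cnt.length : Int) - (j + 1))

lemma pvLoopA_zero (cnt : List Int) (f : Nat) (s : Int) :
    pvLoopA cnt f s 0 = s := by
  cases f <;> simp [pvLoopA]

lemma pvSum_nonneg {st : List Int} (h : ∀ x ∈ st, 0 ≤ x) : 0 ≤ st.sum := by
  induction st with
  | nil => simp
  | cons a t ih =>
    simp only [List.sum_cons]
    have := h a (by simp)
    have := ih (fun x hx => h x (List.mem_cons_of_mem _ hx))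
    omega

lemma pvLoopB_all_zero (cnt : List Int) :
    ∀ (st : List Int) (f : Nat) (s : Int), (∀ x ∈ st, x = 0) → st.length ≤ f →
    pvLoopB cnt f s st = s := by
  intro st
  induction st with
  | nil => intro f s _ _; cases f <;> simp [pvLoopB]
  | cons a t ih =>
    intro f s hz hf
    cases f with
    | zero => simp at hf
    | succ f =>
      have ha : a = 0 := hz a (by simp)
      simp only [pvLoopB, ha, reduceIte]
      exact ih f s (fun x hx => hz x (List.mem_cons_of_mem _ hx)) (by simpa using hf)

lemma pvDrop_sum_eq (cnt : List Int) (j : Nat) (h : j < cnt.length) :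
    (cnt.drop j).sum = cnt[j] + (cnt.drop (j + 1)).sum := by
  rw [List.drop_eq_getElem_cons h, List.sum_cons]

lemma pvKey (cnt : List Int) (h0 : ∀ x ∈ cnt, 0 ≤ x) :
    ∀ (fB fA : Nat) (j : Nat) (c : Int) (st : List Int),
      c = st.sum → (∀ x ∈ st, 0 ≤ x) → j < cnt.length →
      c + pvTQ cnt j ≤ 0 →
      cnt.length - 1 - j ≤ fA → 2 * (cnt.length - 1 - j) + st.length ≤ fB →
      pvLoopA cnt fA (j : Int) c = pvLoopB cnt fB (j : Int) st := by
  intro fB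
  induction fB with
  | zero =>
    intro fA j c st hc hst hj _ _ hfB
    have hst0 : st = [] := by
      cases st with
      | nil => rfl
      | cons a t => simp at hfB
    subst hst0
    simp only [List.sum_nil] at hc
    subst hc
    simp [pvLoopA_zero, pvLoopB]
  | succ fB ih =>
    intro fA j c st hc hst hj hQ hfA hfB
    have hcnn : 0 ≤ c := hc ▸ pvSum_nonneg hst
    by_cases hc0 : c = 0
    · -- loop over: A returns immediately, B pops its all-zero stack
      subst hc0
      rw [pvLoopA_zero]
      have hz : ∀ x ∈ st, x = 0 := by
        intro x hx
        have hxn := hst x hx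
        -- x ≤ sum of nonneg list containing it
        have : x ≤ st.sum := List.single_le_sum hst x hx
        omega
      exact (pvLoopB_all_zero cnt st (fB + 1) j hz (by omega)).symm
    · -- c ≥ 1; hence j+1 < length (else pvTQ = 0 and c + 0 ≤ 0 contradicts c ≥ 1)
      have hc1 : 1 ≤ c := by omega
      have hj1 : j + 1 < cnt.length := by
        by_contra hge
        have hdrop : cnt.drop (j + 1) = [] := List.drop_eq_nil_of_le (by omega)
        have : pvTQ cnt j = 0 - ((cnt.length : Int) - (j + 1)) := by
          simp [pvTQ, hdrop]
        have hlen : (cnt.length : Int) ≤ (j : Int) + 1 := by exact_mod_cast Nat.le_of_not_lt hge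
        have hlen2 : (j : Int) < cnt.length := by exact_mod_cast hj
        omega
      have hn : (PySem.List.pyGet? cnt ((j : Int) + 1)).getD 0 = cnt[j + 1] := by
        have : ((j : Int) + 1) = ((j + 1 : Nat) : Int) := by push_cast; ring
        rw [this, PySem.List.pyGet?_natCast]
        simp [List.getElem?_eq_getElem hj1]
      have hnnn : 0 ≤ cnt[j + 1] := h0 _ (List.getElem_mem hj1)
      -- A's branch merge: new counter is c + n - 1 in every case
      have hA : (if cnt[j+1] = 0 then c - 1 else if cnt[j+1] > 1 then c + cnt[j+1] - 1 else c)
          = c + cnt[j+1] - 1 := by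
        by_cases h1 : cnt[j+1] = 0
        · simp [h1]
        · by_cases h2 : cnt[j+1] > 1
          · simp [h1, h2]
          · have : cnt[j+1] = 1 := by omega
            simp [this]
      -- pvTQ recurrence
      have hTQ : pvTQ cnt j = cnt[j+1] - 1 + pvTQ cnt (j + 1) := by
        simp only [pvTQ]
        rw [pvDrop_sum_eq cnt (j + 1) hj1]
        push_cast
        ring
      cases st with
      | nil => simp [List.sum_nil] at hc; omega
      | cons top rest =>
        by_cases htop : top = 0
        · -- B pops a finished node; A's state unchanged
          subst htop
          simp only [pvLoopB, reduceIte]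
          exact ih fA j c rest (by simpa using hc)
            (fun x hx => hst x (List.mem_cons_of_mem _ hx)) hj hQ hfA (by simp at hfB ⊢; omega)
        · -- B descends into the next child; A takes one scan step
          obtain ⟨fA', rfl⟩ : ∃ fA', fA = fA' + 1 := by
            cases fA with
            | zero => exfalso; omega
            | succ k => exact ⟨k, rfl⟩
          simp only [pvLoopA, if_neg hc0, pvLoopB, if_neg htop]
          rw [hn, hA]
          have hjc : ((j : Int) + 1) = ((j + 1 : Nat) : Int) := by push_cast; ring
          rw [hjc]
          have htopnn : 0 ≤ top := hst top (by simp)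
          have hrest : ∀ x ∈ cnt[j+1] :: (top - 1) :: rest, 0 ≤ x := by
            intro x hx
            simp only [List.mem_cons] at hx
            rcases hx with rfl | rfl | hx
            · exact hnnn
            · omega
            · exact hst x (List.mem_cons_of_mem _ hx)
          have hsum' : c + cnt[j+1] - 1 = (cnt[j+1] :: (top - 1) :: rest).sum := by
            simp only [List.sum_cons] at hc ⊢
            omega
          have hQ' : c + cnt[j+1] - 1 + pvTQ cnt (j + 1) ≤ 0 := by omega
          have hfA' : cnt.length - 1 - (j + 1) ≤ fA' := by omega
          have hfB' : 2 * (cnt.length - 1 - (j + 1)) + (cnt[j+1] :: (top - 1) :: rest).length ≤ fB := by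
            simp only [List.length_cons] at hfB ⊢
            omega
          exact ih fA' (j + 1) (c + cnt[j+1] - 1) _ hsum' hrest hj1 hQ' hfA' hfB'

-- ===== VERDICT (by name: the statement is the Claim_ definition above) =====
theorem find_subtree_end_py_spec : Claim_equal_find_subtree_end_py := by
  intro s cnt _ hpre
  obtain ⟨hin, hleaf | ⟨hs0, hnn, hsum⟩⟩ := hpre
  · -- the start is a leaf: A returns immediately, B pops its single 0
    unfold Spec_find_subtree_end_py find_subtree_end_py find_subtree_end_py_alt
    rw [hleaf, pvLoopA_zero]
    exact (pvLoopB_all_zero cnt [0] (2 * cnt.length + 2) s (by simp) (by simp)).symm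
  · have hslen : s < cnt.length := hin.2
    unfold Spec_find_subtree_end_py find_subtree_end_py find_subtree_end_py_alt
    obtain ⟨j, rfl⟩ : ∃ j : Nat, s = (j : Int) := ⟨s.toNat, (Int.toNat_of_nonneg hs0).symm⟩
    have hj : j < cnt.length := by exact_mod_cast hslen
    have hget : (PySem.List.pyGet? cnt (j : Int)).getD 0 = cnt[j] := by
      rw [PySem.List.pyGet?_natCast]
      simp [List.getElem?_eq_getElem hj]
    rw [hget]
    have htn : (↑j : Int).toNat = j := by simp
    rw [htn] at hsum
    have hQ0 : cnt[j] + pvTQ cnt j ≤ 0 := by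
      have hd := pvDrop_sum_eq cnt j hj
      simp only [pvTQ]
      omega
    have hfB0 : 2 * (cnt.length - 1 - j) + ([cnt[j]] : List Int).length ≤ 2 * cnt.length + 2 := by
      simp only [List.length_singleton]
      omega
    exact pvKey cnt hnn _ _ j cnt[j] [cnt[j]] (by simp)
      (by intro x hx; simp at hx; subst hx; exact hnn _ (List.getElem_mem hj)) hj hQ0 (by omega) hfB0
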